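-- pv_equiv track=rewrite | github.com/DmitryBozhko/CPU-Design-and-Simulation-Project | src/numeric_core/adders.py | ripple_carry_adder
-- ===== SOURCE A (Python) =====
-- from itertools import zip_longest
--
-- def _as_bit(value: int) -> int:
--     return value & 1
--
-- def half_adder(a: int, b: int) -> tuple[int, int]:
--
--     a_bit = _as_bit(a)
--     b_bit = _as_bit(b)
--
--     sum_bit = (a_bit ^ b_bit) & 1
--     carry_bit = a_bit & b_bit
--
--     return sum_bit, carry_bit
--
-- def full_adder(a: int, b: int, cin: int) -> tuple[int, int]:
--
--     cin_bit = _as_bit(cin)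
--     first_sum, first_carry = half_adder(a, b)
--     final_sum, second_carry = half_adder(first_sum, cin_bit)
--     final_carry = first_carry | second_carry
--
--     return final_sum & 1, final_carry & 1
--
-- def ripple_carry_adder(
--     a_bits: list[int],
--     b_bits: list[int],
--     cin: int = 0,
-- ) -> tuple[list[int], int]:
--
--     carry = _as_bit(cin)
--     result_bits: list[int] = []
--
--     for a_bit, b_bit in zip_longest(a_bits, b_bits, fillvalue=0):
--         sum_bit, carry = full_adder(a_bit, b_bit, carry)
--         result_bits.append(sum_bit)
--
--     return result_bits, carry
-- ===== SOURCE B (Python) =====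
-- def ripple_carry_adder(a_bits, b_bits, cin=0):
--     val_a = sum((b & 1) << i for i, b in enumerate(a_bits))
--     val_b = sum((b & 1) << i for i, b in enumerate(b_bits))
--     n = max(len(a_bits), len(b_bits))
--     total = val_a + val_b + (cin & 1)
--     return [(total >> i) & 1 for i in range(n)], total >> n
-- ===== Notes on version B (the rewrite author's own statement) =====
-- stated objective: alternative
-- what changed: Replaces the bit-by-bit full-adder loop with big-integer arithmetic: pack both bit lists into integers (masking each bit), add once, and read the result bits and carry back off with shifts.
import Mathlib
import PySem

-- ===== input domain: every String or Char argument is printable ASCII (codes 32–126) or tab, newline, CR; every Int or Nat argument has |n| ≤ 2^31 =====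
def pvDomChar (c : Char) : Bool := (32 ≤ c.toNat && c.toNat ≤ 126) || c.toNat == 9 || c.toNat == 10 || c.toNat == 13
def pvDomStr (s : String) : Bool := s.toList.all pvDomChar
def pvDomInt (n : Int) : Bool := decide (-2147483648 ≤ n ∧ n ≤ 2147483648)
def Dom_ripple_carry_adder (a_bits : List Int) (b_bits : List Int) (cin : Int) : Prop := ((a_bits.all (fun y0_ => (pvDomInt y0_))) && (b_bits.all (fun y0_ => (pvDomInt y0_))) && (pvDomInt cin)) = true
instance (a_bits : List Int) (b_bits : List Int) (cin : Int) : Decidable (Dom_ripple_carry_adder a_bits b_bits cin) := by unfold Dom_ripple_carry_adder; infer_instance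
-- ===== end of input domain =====

-- B replaces A's bit-by-bit full-adder loop with one big-integer addition (pack bits, add once,
-- read result bits and final carry back off with shifts); same return value, no speed claim.

-- ===== PORT A =====
def _as_bit (value : Int) : Int := PySem.Int.band value 1

def half_adder (a : Int) (b : Int) : Int × Int :=
  let a_bit := _as_bit a
  let b_bit := _as_bit b
  let sum_bit := PySem.Int.band (PySem.Int.bxor a_bit b_bit) 1
  let carry_bit := PySem.Int.band a_bit b_bit
  (sum_bit, carry_bit)

def full_adder (a : Int) (b : Int) (cin : Int) : Int × Int :=
  let cin_bit := _as_bit cin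
  let fst := half_adder a b
  let snd := half_adder fst.1 cin_bit
  let final_carry := PySem.Int.bor fst.2 snd.2
  (PySem.Int.band snd.1 1, PySem.Int.band final_carry 1)

-- itertools.zip_longest(a, b, fillvalue=0), materialised as a list
def pvZipLongest : List Int → List Int → List (Int × Int)
  | [], [] => []
  | x :: xs, [] => (x, 0) :: pvZipLongest xs []
  | [], y :: ys => (0, y) :: pvZipLongest [] ys
  | x :: xs, y :: ys => (x, y) :: pvZipLongest xs ys

-- the body of A's for-loop: append the sum bit, keep the carry
def pvStep (st : List Int × Int) (p : Int × Int) : List Int × Int :=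
  let sc := full_adder p.1 p.2 st.2
  (st.1 ++ [sc.1], sc.2)

def ripple_carry_adder (a_bits : List Int) (b_bits : List Int) (cin : Int) : List Int × Int :=
  (pvZipLongest a_bits b_bits).foldl pvStep ([], _as_bit cin)

-- ===== PORT B =====
-- sum((b & 1) << i for i, b in enumerate(bits))   (List.zipIdx pairs value-first)
def pvBitsVal (bits : List Int) : Int :=
  (bits.zipIdx.map (fun p => PySem.Int.band p.1 1 <<< p.2)).sum

def ripple_carry_adder_alt (a_bits : List Int) (b_bits : List Int) (cin : Int) : List Int × Int :=
  let val_a := pvBitsVal a_bits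
  let val_b := pvBitsVal b_bits
  let n := max a_bits.length b_bits.length
  let total := val_a + val_b + PySem.Int.band cin 1
  ((List.range n).map (fun (i : Nat) => PySem.Int.band (total >>> i) 1), total >>> n)

-- ===== PRECONDITION & SPEC =====
def Spec_ripple_carry_adder (a_bits : List Int) (b_bits : List Int) (cin : Int) (out : List Int × Int) : Prop := out = ripple_carry_adder_alt a_bits b_bits cin
instance (a_bits : List Int) (b_bits : List Int) (cin : Int) (out : List Int × Int) : Decidable (Spec_ripple_carry_adder a_bits b_bits cin out) := by unfold Spec_ripple_carry_adder; infer_instance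

-- ===== CLAIM (what is proved, stated in full; the proofs are below) =====
def Claim_equal_ripple_carry_adder : Prop := ∀ (a_bits : List Int) (b_bits : List Int) (cin : Int), Dom_ripple_carry_adder a_bits b_bits cin → Spec_ripple_carry_adder a_bits b_bits cin (ripple_carry_adder a_bits b_bits cin)

-- ===== LEMMAS AND PROOFS =====

theorem band_one_cases (x : Int) : PySem.Int.band x 1 = 0 ∨ PySem.Int.band x 1 = 1 := by
  rw [PySem.Int.band_one]
  have h1 := PySem.Int.mod_nonneg x (b := 2) (by norm_num)
  have h2 := PySem.Int.mod_lt x (b := 2) (by norm_num)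
  omega

-- a full adder on a 0/1 carry is exactly (t % 2, t / 2) for t = a&1 + b&1 + c
theorem fullAdder_eq (a b c : Int) (hc : c = 0 ∨ c = 1) :
    full_adder a b c =
      ((PySem.Int.band a 1 + PySem.Int.band b 1 + c) % 2,
       (PySem.Int.band a 1 + PySem.Int.band b 1 + c) / 2) := by
  rcases band_one_cases a with ha | ha <;> rcases band_one_cases b with hb | hb <;>
    rcases hc with hc | hc <;>
      simp [full_adder, half_adder, _as_bit, ha, hb, hc] <;> decide

-- the accumulator of A's loop only ever grows on the right
theorem foldl_pvStep_acc (l : List (Int × Int)) (acc : List Int) (c : Int) :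
    l.foldl pvStep (acc, c) =
      (acc ++ (l.foldl pvStep ([], c)).1, (l.foldl pvStep ([], c)).2) := by
  induction l generalizing acc c with
  | nil => simp
  | cons p l ih =>
    simp only [List.foldl_cons, pvStep]
    rw [ih (acc ++ _), ih ([] ++ _)]
    simp

theorem shiftRight_succ_ediv (m : Int) (n : Nat) : m >>> (n + 1) = (m / 2) >>> n := by
  cases m with
  | ofNat k =>
    have h : (Int.ofNat k) / 2 = Int.ofNat (k / 2) := by
      simp only [Int.ofNat_eq_natCast]; omega
    rw [h]
    show Int.ofNat (k >>> (n + 1)) = Int.ofNat ((k / 2) >>> n)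
    congr 1
    simp [Nat.shiftRight_eq_div_pow, Nat.div_div_eq_div_mul, pow_succ]
    ring_nf
  | negSucc k =>
    have h : (Int.negSucc k) / 2 = Int.negSucc (k / 2) := by
      rw [Int.negSucc_eq, Int.negSucc_eq]; omega
    rw [h]
    show Int.negSucc (k >>> (n + 1)) = Int.negSucc ((k / 2) >>> n)
    congr 1
    simp [Nat.shiftRight_eq_div_pow, Nat.div_div_eq_div_mul, pow_succ]
    ring_nf

-- reading the bits of 2*C + s (s a bit): bit 0 is s, the rest are the bits of C
theorem bits_head (s C : Int) (hs : s = 0 ∨ s = 1) :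
    PySem.Int.band (2 * C + s) 1 = s := by
  rw [PySem.Int.band_one, PySem.Int.mod_eq_emod_of_pos (by norm_num)]
  omega

theorem bits_shift (s C : Int) (hs : s = 0 ∨ s = 1) (i : Nat) :
    (2 * C + s) >>> (i + 1) = C >>> i := by
  rw [shiftRight_succ_ediv]
  congr 1
  omega

-- prepending the low bit s to the bit/carry reading of C reads 2*C + s
theorem pair_step (s C : Int) (hs : s = 0 ∨ s = 1) (n : Nat) :
    (([s] ++ (List.range n).map (fun (i : Nat) => PySem.Int.band (C >>> i) 1), C >>> n) :
        List Int × Int) =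
      ((List.range (n + 1)).map (fun (i : Nat) => PySem.Int.band ((2 * C + s) >>> i) 1),
        (2 * C + s) >>> (n + 1)) := by
  rw [List.range_succ_eq_map, List.map_cons, List.map_map]
  refine Prod.ext ?_ ?_
  · simp only [List.cons_append, List.nil_append, List.cons.injEq]
    constructor
    · rw [Int.shiftRight_zero, bits_head s C hs]
    · apply List.map_congr_left
      intro i _
      simp [Function.comp, bits_shift s C hs]
  · exact (bits_shift s C hs n).symm

-- the recursive value of a bit list, and its agreement with pvBitsVal
def pvW : List Int → Int
  | [] => 0
  | x :: xs => PySem.Int.band x 1 + 2 * pvW xs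

theorem zipIdx_val (xs : List Int) (k : Nat) :
    ((xs.zipIdx k).map (fun p => PySem.Int.band p.1 1 <<< p.2)).sum = 2 ^ k * pvW xs := by
  induction xs generalizing k with
  | nil => simp [pvW]
  | cons x xs ih =>
    rw [List.zipIdx_cons, List.map_cons, List.sum_cons, ih (k + 1)]
    simp only [pvW, Int.shiftLeft_natCast_right, Int.shiftLeft_eq]
    ring

theorem pvBitsVal_eq_pvW (xs : List Int) : pvBitsVal xs = pvW xs := by
  have := zipIdx_val xs 0
  simpa [pvBitsVal] using this

-- main loop invariant: A's loop computes the bits and final carry of pvW xs + pvW ys + c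
theorem ripple_main (xs ys : List Int) (c : Int) (hc : c = 0 ∨ c = 1) :
    (pvZipLongest xs ys).foldl pvStep ([], c) =
      ((List.range (max xs.length ys.length)).map
         (fun (i : Nat) => PySem.Int.band ((pvW xs + pvW ys + c) >>> i) 1),
       (pvW xs + pvW ys + c) >>> (max xs.length ys.length)) := by
  have h0 : PySem.Int.band (0 : Int) 1 = 0 := by decide
  induction xs generalizing ys c with
  | nil =>
    induction ys generalizing c with
    | nil => simp [pvZipLongest, pvW, Int.shiftRight_zero]
    | cons y ys ihy =>
      have tb := band_one_cases y
      have hc2 : (PySem.Int.band 0 1 + PySem.Int.band y 1 + c) / 2 = 0 ∨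
                 (PySem.Int.band 0 1 + PySem.Int.band y 1 + c) / 2 = 1 := by omega
      have hs : (PySem.Int.band 0 1 + PySem.Int.band y 1 + c) % 2 = 0 ∨
                (PySem.Int.band 0 1 + PySem.Int.band y 1 + c) % 2 = 1 := by omega
      simp only [pvZipLongest, List.foldl_cons, pvStep, fullAdder_eq 0 y c hc]
      rw [foldl_pvStep_acc, ihy _ hc2]
      have hT : pvW ([] : List Int) + pvW (y :: ys) + c =
          2 * (pvW ([] : List Int) + pvW ys +
               (PySem.Int.band 0 1 + PySem.Int.band y 1 + c) / 2) +
          (PySem.Int.band 0 1 + PySem.Int.band y 1 + c) % 2 := by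
        simp only [pvW]; omega
      have hmax : max ([] : List Int).length (y :: ys).length =
          max ([] : List Int).length ys.length + 1 := by simp
      rw [hT, hmax]
      exact pair_step _ _ hs _
  | cons x xs ihx =>
    cases ys with
    | nil =>
      have ta := band_one_cases x
      have hc2 : (PySem.Int.band x 1 + PySem.Int.band 0 1 + c) / 2 = 0 ∨
                 (PySem.Int.band x 1 + PySem.Int.band 0 1 + c) / 2 = 1 := by omega
      have hs : (PySem.Int.band x 1 + PySem.Int.band 0 1 + c) % 2 = 0 ∨
                (PySem.Int.band x 1 + PySem.Int.band 0 1 + c) % 2 = 1 := by omega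
      simp only [pvZipLongest, List.foldl_cons, pvStep, fullAdder_eq x 0 c hc]
      rw [foldl_pvStep_acc, ihx [] _ hc2]
      have hT : pvW (x :: xs) + pvW ([] : List Int) + c =
          2 * (pvW xs + pvW ([] : List Int) +
               (PySem.Int.band x 1 + PySem.Int.band 0 1 + c) / 2) +
          (PySem.Int.band x 1 + PySem.Int.band 0 1 + c) % 2 := by
        simp only [pvW]; omega
      have hmax : max (x :: xs).length ([] : List Int).length =
          max xs.length ([] : List Int).length + 1 := by simp
      rw [hT, hmax]
      exact pair_step _ _ hs _
    | cons y ys =>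
      have ta := band_one_cases x
      have tb := band_one_cases y
      have hc2 : (PySem.Int.band x 1 + PySem.Int.band y 1 + c) / 2 = 0 ∨
                 (PySem.Int.band x 1 + PySem.Int.band y 1 + c) / 2 = 1 := by omega
      have hs : (PySem.Int.band x 1 + PySem.Int.band y 1 + c) % 2 = 0 ∨
                (PySem.Int.band x 1 + PySem.Int.band y 1 + c) % 2 = 1 := by omega
      simp only [pvZipLongest, List.foldl_cons, pvStep, fullAdder_eq x y c hc]
      rw [foldl_pvStep_acc, ihx ys _ hc2]
      have hT : pvW (x :: xs) + pvW (y :: ys) + c =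
          2 * (pvW xs + pvW ys + (PySem.Int.band x 1 + PySem.Int.band y 1 + c) / 2) +
          (PySem.Int.band x 1 + PySem.Int.band y 1 + c) % 2 := by
        simp only [pvW]; omega
      have hmax : max (x :: xs).length (y :: ys).length = max xs.length ys.length + 1 := by
        simp [Nat.succ_max_succ]
      rw [hT, hmax]
      exact pair_step _ _ hs _

-- ===== VERDICT (by name: the statement is the Claim_ definition above) =====
theorem ripple_carry_adder_spec : Claim_equal_ripple_carry_adder := by
  intro a_bits b_bits cin _
  show ripple_carry_adder a_bits b_bits cin = ripple_carry_adder_alt a_bits b_bits cin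
  unfold ripple_carry_adder ripple_carry_adder_alt _as_bit
  rw [ripple_main a_bits b_bits _ (band_one_cases cin)]
  simp [pvBitsVal_eq_pvW]
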